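-- pv_equiv track=rewrite | github.com/lyksunny/color_stitching | color_stitching.py | get_color_dict
-- ===== SOURCE A (Python) =====
-- def get_color_dict(bottoms):
--     # 颜色字典
--     color_dict = {}
--     k = 1
--     for i, bottom in enumerate(bottoms):
--         for j, color in enumerate(bottom):
--             if color not in color_dict:
--                 color_dict[color] = k
--                 k += 1
--     return color_dict
-- ===== SOURCE B (Python) =====
-- def get_color_dict(bottoms):
--     # Rank-by-first-occurrence: flatten, build each color's first-occurrence
--     # index with one reverse scan (later writes win, so the smallest index
--     # sticks), then sort the distinct colors by that index; a color's id is
--     # its 1-based rank.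
--     flat = [color for bottom in bottoms for color in bottom]
--     first = {}
--     for i in range(len(flat) - 1, -1, -1):
--         first[flat[i]] = i
--     order = sorted(first, key=first.get)
--     return {color: i + 1 for i, color in enumerate(order)}
-- ===== Notes on version B (the rewrite author's own statement) =====
-- stated objective: alternative
-- what changed: A's online loop maintaining a membership dict and a running counter is replaced by a rank-by-first-occurrence algorithm: flatten, compute each color's first-occurrence index by a reverse scan with overwriting dict writes, sort the distinct colors by that index, and assign each its 1-based rank.
import Mathlib
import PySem

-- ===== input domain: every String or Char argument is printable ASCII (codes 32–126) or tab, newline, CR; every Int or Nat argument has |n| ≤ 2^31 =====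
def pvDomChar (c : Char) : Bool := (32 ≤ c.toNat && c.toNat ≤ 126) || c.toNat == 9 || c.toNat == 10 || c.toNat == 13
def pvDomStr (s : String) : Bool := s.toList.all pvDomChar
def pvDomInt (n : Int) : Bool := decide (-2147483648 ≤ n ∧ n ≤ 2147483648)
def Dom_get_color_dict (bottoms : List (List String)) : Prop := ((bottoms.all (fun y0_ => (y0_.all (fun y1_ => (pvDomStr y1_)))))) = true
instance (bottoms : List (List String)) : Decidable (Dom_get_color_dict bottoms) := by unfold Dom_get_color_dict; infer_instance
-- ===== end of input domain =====

-- B replaces A's online membership-and-counter loop by ranking the distinct colors sorted by first-occurrence index (alternative algorithm, not faster).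


-- ===== PORT A =====
-- inner step of A's loop: 'if color not in color_dict: color_dict[color] = k; k += 1'
def gcdStep (st : PySem.Dict String Int × Int) (color : String) : PySem.Dict String Int × Int :=
  if st.1.contains color then st else (st.1.insert color st.2, st.2 + 1)

def get_color_dict (bottoms : List (List String)) : List (String × Int) :=
  (bottoms.foldl (fun st bottom => bottom.foldl gcdStep st) (PySem.Dict.empty, (1 : Int))).1.items

-- ===== PORT B =====
-- 'flat = [color for bottom in bottoms for color in bottom]'
-- 'for i in range(len(flat) - 1, -1, -1): first[flat[i]] = i' — every i is in range,
--   so flat[i] never raises (pyGetD's default "" is never read)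
-- 'sorted(first, key=first.get)' — every key is present, so '.getD 0' only totalizes first.get
-- '{color: i + 1 for i, color in enumerate(order)}' — keys distinct, so the dict's items are these pairs in order
def get_color_dict_alt (bottoms : List (List String)) : List (String × Int) :=
  let flat := bottoms.flatMap (fun bottom => bottom)
  let first := (PySem.List.pyRange (PySem.List.len flat - 1) (-1) (-1)).foldl
      (fun d i => d.insert (PySem.List.pyGetD flat i "") i) PySem.Dict.empty
  let order := PySem.List.sorted first.keys (fun c => first.getD c 0) false
  (PySem.List.enumerate order 0).map (fun p => (p.2, p.1 + 1))

-- ===== PRECONDITION & SPEC =====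
def Spec_get_color_dict (bottoms : List (List String)) (out : List (String × Int)) : Prop := out = get_color_dict_alt bottoms
instance (bottoms : List (List String)) (out : List (String × Int)) : Decidable (Spec_get_color_dict bottoms out) := by unfold Spec_get_color_dict; infer_instance

-- ===== CLAIM (what is proved, stated in full; the proofs are below) =====
def Claim_equal_get_color_dict : Prop := ∀ (bottoms : List (List String)), Dom_get_color_dict bottoms → Spec_get_color_dict bottoms (get_color_dict bottoms)

-- ===== LEMMAS AND PROOFS =====

-- the elements of cs not in seen, first occurrences, in order
def gNew (cs seen : List String) : List String :=
  match cs with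
  | [] => []
  | c :: t => if seen.contains c then gNew t seen else c :: gNew t (seen ++ [c])

-- first-occurrence index used as B's sort key
def fIdx (flat : List String) (c : String) : Nat :=
  (PySem.List.index? flat c).getD 0

-- B's reverse loop, rephrased over the reversed enumeration of flat (see firstD_eq)
def firstD (l : List (Int × String)) : PySem.Dict String Int :=
  l.foldl (fun d p => d.insert p.2 p.1) PySem.Dict.empty

lemma foldA_flatten (bs : List (List String)) (st : PySem.Dict String Int × Int) :
    bs.foldl (fun st bottom => bottom.foldl gcdStep st) st
      = (bs.flatMap (fun bottom => bottom)).foldl gcdStep st := by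
  induction bs generalizing st with
  | nil => rfl
  | cons b t ih => simp [List.foldl_append, ih]

lemma dict_contains_keys (d : PySem.Dict String Int) (c : String) :
    d.contains c = d.keys.contains c := by
  rw [PySem.Dict.contains_eq_decide_mem_keys]
  simp

lemma fold_invariant (cs : List String) (d : PySem.Dict String Int) (k : Int) :
    (cs.foldl gcdStep (d, k)).1.items
      = d.items ++ (PySem.List.enumerate (gNew cs d.keys) k).map (fun p => (p.2, p.1)) := by
  induction cs generalizing d k with
  | nil => simp [gNew]
  | cons c t ih =>
    simp only [List.foldl_cons, gcdStep, gNew, ← dict_contains_keys]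
    by_cases h : d.contains c
    · simp [h, ih]
    · simp [h, ih, PySem.Dict.insert, PySem.Dict.keys]

-- the first occurrence of c in pre ++ c :: t is at pre.length when c ∉ pre
lemma fIdx_append (pre t : List String) (c : String) (hc : c ∉ pre) :
    fIdx (pre ++ c :: t) c = pre.length := by
  unfold fIdx
  rw [show PySem.List.index? (pre ++ c :: t) c = some pre.length from
    (PySem.List.index?_eq_some_iff (pre ++ c :: t) c pre.length).mpr ⟨pre, t, rfl, rfl, hc⟩]
  rfl

-- the key invariant: along gNew, first-occurrence indices are strictly increasing
lemma gNew_pairwise (cs : List String) : ∀ (pre seen : List String),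
    (∀ x ∈ pre, x ∈ seen) →
    (∀ c ∈ gNew cs seen, pre.length ≤ fIdx (pre ++ cs) c) ∧
    List.Pairwise (fun a b => fIdx (pre ++ cs) a < fIdx (pre ++ cs) b) (gNew cs seen) := by
  induction cs with
  | nil => intro pre seen _; simp [gNew]
  | cons c t ih =>
    intro pre seen hps
    by_cases hm : c ∈ seen
    · have hps' : ∀ x ∈ pre ++ [c], x ∈ seen := by
        intro x hx; rcases List.mem_append.mp hx with h | h
        · exact hps x h
        · simpa using (List.mem_singleton.mp h ▸ hm)
      have := ih (pre ++ [c]) seen hps'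
      rw [List.append_assoc, List.singleton_append] at this
      simp only [gNew, List.contains_eq_mem, hm, decide_true, if_true]
      refine ⟨fun d hd => ?_, this.2⟩
      have := this.1 d hd
      simp only [List.length_append, List.length_singleton] at this
      omega
    · have hcpre : c ∉ pre := fun h => hm (hps c h)
      have hps' : ∀ x ∈ pre ++ [c], x ∈ seen ++ [c] := by
        intro x hx; rcases List.mem_append.mp hx with h | h
        · exact List.mem_append.mpr (Or.inl (hps x h))
        · exact List.mem_append.mpr (Or.inr h)
      have hih := ih (pre ++ [c]) (seen ++ [c]) hps'
      rw [List.append_assoc, List.singleton_append] at hih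
      have hhead : fIdx (pre ++ c :: t) c = pre.length := fIdx_append pre t c hcpre
      simp only [gNew, List.contains_eq_mem, hm, decide_false]
      constructor
      · intro d hd
        rcases List.mem_cons.mp hd with h | h
        · subst h; omega
        · have := hih.1 d h
          simp only [List.length_append, List.length_singleton] at this
          omega
      · refine List.pairwise_cons.mpr ⟨fun d hd => ?_, hih.2⟩
        have := hih.1 d hd
        simp only [List.length_append, List.length_singleton] at this
        omega

-- membership in gNew
lemma mem_gNew (cs : List String) : ∀ (seen : List String) (c : String),
    c ∈ gNew cs seen ↔ c ∈ cs ∧ c ∉ seen := by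
  induction cs with
  | nil => intro seen c; simp [gNew]
  | cons x t ih =>
    intro seen c
    by_cases hm : x ∈ seen
    · rw [show gNew (x :: t) seen = gNew t seen from by simp [gNew, hm]]
      rw [ih]
      simp only [List.mem_cons]
      constructor
      · rintro ⟨h1, h2⟩; exact ⟨Or.inr h1, h2⟩
      · rintro ⟨h1 | h1, h2⟩
        · exact absurd (h1 ▸ hm) h2
        · exact ⟨h1, h2⟩
    · rw [show gNew (x :: t) seen = x :: gNew t (seen ++ [x]) from by simp [gNew, hm]]
      simp only [List.mem_cons, ih, List.mem_append]
      by_cases hxc : c = x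
      · subst hxc; simp [hm]
      · simp only [hxc, false_or]
        tauto

-- B's fold over the reversed range equals firstD of the reversed enumeration
lemma firstD_eq (flat : List String) :
    (PySem.List.pyRange (PySem.List.len flat - 1) (-1) (-1)).foldl
        (fun d i => d.insert (PySem.List.pyGetD flat i "") i) PySem.Dict.empty
      = firstD ((PySem.List.enumerate flat 0).reverse) := by
  have h1 : PySem.List.pyRange (PySem.List.len flat - 1) (-1) (-1)
      = (PySem.List.pyRange 0 (PySem.List.len flat) 1).reverse := by
    rw [PySem.List.pyRange_neg_one_eq_reverse]
    norm_num
  rw [h1, PySem.List.enumerate_eq_map_pyRange flat "", ← List.map_reverse, firstD,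
    List.foldl_map]

-- what the reverse overwrite loop computes: the FIRST occurrence index of each key
lemma firstD_get? (flat : List String) : ∀ (s : Int) (c : String),
    (firstD ((PySem.List.enumerate flat s).reverse)).get? c
      = (PySem.List.index? flat c).map (fun k => s + (k : Int)) := by
  induction flat with
  | nil => intro s c; simp [firstD, PySem.List.enumerate_nil, PySem.Dict.empty,
      PySem.Dict.get?, PySem.List.index?]
  | cons x t ih =>
    intro s c
    rw [PySem.List.enumerate_cons]
    simp only [List.reverse_cons, firstD, List.foldl_append, List.foldl_cons, List.foldl_nil]
    by_cases hxc : c = x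
    · subst hxc
      rw [PySem.Dict.get?_insert_self, PySem.List.index?_cons_self]
      simp
    · rw [PySem.Dict.get?_insert_of_ne _ _ hxc,
        PySem.List.index?_cons_of_ne _ (fun h => hxc h.symm)]
      have := ih (s + 1) c
      simp only [firstD] at this
      rw [this]
      cases PySem.List.index? t c with
      | none => rfl
      | some k =>
        have harith : s + 1 + (k : Int) = s + ((k : Int) + 1) := by ring
        simp [harith]

-- the keys of the dict built by the reverse loop have no duplicates
lemma keys_insert (d : PySem.Dict String Int) (k : String) (v : Int) :
    (d.insert k v).keys = if k ∈ d.keys then d.keys else d.keys ++ [k] := by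
  by_cases hm : k ∈ d.keys
  · have hc : d.contains k = true := by
      rw [PySem.Dict.contains_eq_decide_mem_keys]; exact decide_eq_true hm
    have hit : (d.insert k v).items
        = List.map (fun p => if (p.1 == k) = true then (k, v) else p) d.items := by
      simp [PySem.Dict.insert, hc]
    rw [if_pos hm]
    simp only [PySem.Dict.keys, hit, List.map_map]
    refine List.map_congr_left (fun p _ => ?_)
    by_cases h : p.1 = k <;> simp [h]
  · have hc : d.contains k = false := by
      rw [PySem.Dict.contains_eq_decide_mem_keys]; exact decide_eq_false hm
    have hit : (d.insert k v).items = d.items ++ [(k, v)] := by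
      simp [PySem.Dict.insert, hc]
    rw [if_neg hm]
    simp only [PySem.Dict.keys, hit, List.map_append, List.map_cons, List.map_nil]

lemma firstD_keys_nodup (flat : List String) : ∀ (s : Int),
    (firstD ((PySem.List.enumerate flat s).reverse)).keys.Nodup := by
  induction flat with
  | nil => intro s; simp [firstD, PySem.List.enumerate_nil, PySem.Dict.empty, PySem.Dict.keys]
  | cons x t ih =>
    intro s
    rw [PySem.List.enumerate_cons, List.reverse_cons]
    have hstep : firstD ((PySem.List.enumerate t (s + 1)).reverse ++ [(s, x)])
        = (firstD ((PySem.List.enumerate t (s + 1)).reverse)).insert x s := by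
      simp only [firstD, List.foldl_append, List.foldl_cons, List.foldl_nil]
    rw [hstep, keys_insert]
    by_cases hm : x ∈ (firstD ((PySem.List.enumerate t (s + 1)).reverse)).keys
    · rw [if_pos hm]; exact ih (s + 1)
    · rw [if_neg hm]
      refine List.Nodup.append (ih (s + 1)) (List.nodup_singleton x) ?_
      intro a ha hb
      rw [List.mem_singleton] at hb
      exact hm (hb ▸ ha)

-- a key is in the dict iff it occurs in flat
lemma firstD_mem_keys (flat : List String) (s : Int) (c : String) :
    c ∈ (firstD ((PySem.List.enumerate flat s).reverse)).keys ↔ c ∈ flat := by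
  have hm : c ∈ (firstD ((PySem.List.enumerate flat s).reverse)).keys
      ↔ ((firstD ((PySem.List.enumerate flat s).reverse)).get? c).isSome := by
    simp only [PySem.Dict.keys, PySem.Dict.get?, Option.isSome_map, List.find?_isSome,
      List.mem_map]
    constructor
    · rintro ⟨p, hp, hpc⟩; exact ⟨p, hp, by simp [hpc]⟩
    · rintro ⟨p, hp, hpc⟩; exact ⟨p, hp, by simpa using hpc⟩
  rw [hm, firstD_get?, ← PySem.List.index?_isSome_iff]
  cases PySem.List.index? flat c <;> simp

-- shifting enumerate's start by one equals adding one to each index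
lemma enumerate_shift (l : List String) : ∀ (s : Int),
    (PySem.List.enumerate l s).map (fun p => (p.2, p.1 + 1))
      = (PySem.List.enumerate l (s + 1)).map (fun p => (p.2, p.1)) := by
  induction l with
  | nil => intro s; rfl
  | cons x t ih =>
    intro s
    simp only [PySem.List.enumerate_cons, List.map_cons, ih]

theorem get_color_dict_eq (bottoms : List (List String)) :
    get_color_dict bottoms = get_color_dict_alt bottoms := by
  unfold get_color_dict get_color_dict_alt
  rw [foldA_flatten, fold_invariant]
  simp only [firstD_eq]
  set flat := bottoms.flatMap (fun bottom => bottom) with hflat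
  set fd := firstD ((PySem.List.enumerate flat 0).reverse) with hfd
  have hpw := (gNew_pairwise flat [] [] (by simp)).2
  simp only [List.nil_append] at hpw
  have hmemg : ∀ c, c ∈ gNew flat [] ↔ c ∈ flat := by
    intro c; rw [mem_gNew]; simp
  have hkey : ∀ c ∈ flat, fd.getD c 0 = (fIdx flat c : Int) := by
    intro c hc
    obtain ⟨k, hk⟩ := Option.isSome_iff_exists.mp
      ((PySem.List.index?_isSome_iff flat c).mpr hc)
    simp only [PySem.Dict.getD, hfd, firstD_get?, fIdx, hk, Option.getD_some, zero_add]
    rfl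
  have hnodupg : (gNew flat []).Nodup := by
    refine hpw.imp ?_
    intro a b hlt heq
    exact absurd (heq ▸ hlt) (lt_irrefl _)
  have hperm : (gNew flat []).Perm fd.keys := by
    rw [List.perm_ext_iff_of_nodup hnodupg (firstD_keys_nodup flat 0)]
    intro c
    rw [hmemg, firstD_mem_keys]
  have hsorted : PySem.List.sorted fd.keys (fun c => fd.getD c 0) false = gNew flat [] := by
    apply PySem.List.sorted_eq_of_perm_of_pairwise_lt
    · exact hperm
    · refine hpw.imp_of_mem ?_
      intro a b ha hb hlt
      rw [hkey a ((hmemg a).mp ha), hkey b ((hmemg b).mp hb)]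
      exact_mod_cast hlt
  have hek : (PySem.Dict.empty : PySem.Dict String Int).keys = [] := rfl
  have hei : (PySem.Dict.empty : PySem.Dict String Int).items = [] := rfl
  simp only [hek, hei, List.nil_append, hsorted]
  rw [enumerate_shift (gNew flat []) 0]
  norm_num

-- ===== VERDICT (by name: the statement is the Claim_ definition above) =====
theorem get_color_dict_spec : Claim_equal_get_color_dict := by
  intro bottoms _
  exact get_color_dict_eq bottoms
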